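-- pv_equiv track=rewrite | github.com/dhifanrizky/Schedule-Helper-AI-service | ai/app/graph/agents/prioritizer.py | estimate_priority
-- ===== SOURCE A (Python) =====
-- def estimate_priority(task: str) -> int:
--     text = task.lower()
--     score = 0
--     if any(
--         k in text
--         for k in [
--             "deadline",
--             "besok",
--             "hari ini",
--             "urgent",
--             "segera",
--             "mepet",
--             "demo",
--             "presentasi",
--             "ujian",
--         ]
--     ):
--         score += 4
--     elif "minggu ini" in text or any(
--         k in text
--         for k in [
--             "bug",
--             "error",
--             "fix",
--             "hotfix",
--             "laporan",
--             "proposal",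
--             "revisi",
--             "project",
--         ]
--     ):
--         score += 3
--     elif any(k in text for k in ["meeting", "rapat"]):
--         score += 2
--     else:
--         score += 1
--
--     if score >= 6:
--         return 1
--     if score >= 3:
--         return 2
--     return 3
-- ===== SOURCE B (Python) =====
-- _HIGH = [
--     "deadline", "besok", "hari ini", "urgent", "segera", "mepet",
--     "demo", "presentasi", "ujian",
--     "minggu ini",
--     "bug", "error", "fix", "hotfix", "laporan", "proposal", "revisi", "project",
-- ]
--
-- def estimate_priority(task: str) -> int:
--     # Score never reaches 6 and only >= 3 matters: any tier-4/tier-3 keyword -> 2, else 3.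
--     text = task.lower()
--     return 2 if any(k in text for k in _HIGH) else 3
-- ===== Notes on version B (the rewrite author's own statement) =====
-- stated objective: simpler
-- what changed: Replaced the score accumulator, the elif chain, the meeting/rapat tier and the dead >=6 branch by a single membership test over one combined keyword list, returning 2 on any hit and 3 otherwise (the only values A can produce).
import Mathlib
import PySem

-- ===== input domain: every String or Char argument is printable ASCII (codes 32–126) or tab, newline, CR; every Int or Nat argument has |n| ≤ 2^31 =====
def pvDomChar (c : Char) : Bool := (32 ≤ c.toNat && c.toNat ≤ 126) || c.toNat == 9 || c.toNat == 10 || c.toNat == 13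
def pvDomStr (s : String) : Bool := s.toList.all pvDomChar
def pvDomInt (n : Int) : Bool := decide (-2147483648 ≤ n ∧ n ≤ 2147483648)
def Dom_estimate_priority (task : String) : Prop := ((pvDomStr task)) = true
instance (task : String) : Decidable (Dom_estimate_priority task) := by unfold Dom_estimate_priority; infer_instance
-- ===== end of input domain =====

-- B replaces A's score accumulator, elif chain and dead >=6 branch by one membership
-- test over a combined tier-4/tier-3 keyword list (objective: simpler).


-- ===== PORT A =====
def estimate_priority (task : String) : Int :=
  let text := PySem.Str.lower task
  let score : Int := 0
  let score :=
    if ["deadline", "besok", "hari ini", "urgent", "segera", "mepet",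
        "demo", "presentasi", "ujian"].any (fun k => PySem.Str.isIn k text) then
      score + 4
    else if PySem.Str.isIn "minggu ini" text ||
        ["bug", "error", "fix", "hotfix", "laporan", "proposal", "revisi",
         "project"].any (fun k => PySem.Str.isIn k text) then
      score + 3
    else if ["meeting", "rapat"].any (fun k => PySem.Str.isIn k text) then
      score + 2
    else
      score + 1
  if score ≥ 6 then 1
  else if score ≥ 3 then 2
  else 3

-- ===== PORT B =====
def pvHighKeywords : List String :=
  ["deadline", "besok", "hari ini", "urgent", "segera", "mepet",
   "demo", "presentasi", "ujian",
   "minggu ini",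
   "bug", "error", "fix", "hotfix", "laporan", "proposal", "revisi", "project"]

def estimate_priority_alt (task : String) : Int :=
  let text := PySem.Str.lower task
  if pvHighKeywords.any (fun k => PySem.Str.isIn k text) then 2 else 3

-- ===== PRECONDITION & SPEC =====
def Spec_estimate_priority (task : String) (out : Int) : Prop := out = estimate_priority_alt task
instance (task : String) (out : Int) : Decidable (Spec_estimate_priority task out) := by unfold Spec_estimate_priority; infer_instance

-- ===== CLAIM (what is proved, stated in full; the proofs are below) =====
def Claim_equal_estimate_priority : Prop := ∀ (task : String), Dom_estimate_priority task → Spec_estimate_priority task (estimate_priority task)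

-- ===== LEMMAS AND PROOFS =====

-- ===== VERDICT (by name: the statement is the Claim_ definition above) =====
theorem estimate_priority_spec : Claim_equal_estimate_priority := by
  intro task _
  unfold Spec_estimate_priority estimate_priority estimate_priority_alt pvHighKeywords
  simp only [List.any_cons, List.any_nil, Bool.or_false]
  set t := PySem.Str.lower task
  by_cases h1 : (PySem.Str.isIn "deadline" t || PySem.Str.isIn "besok" t ||
      PySem.Str.isIn "hari ini" t || PySem.Str.isIn "urgent" t || PySem.Str.isIn "segera" t ||
      PySem.Str.isIn "mepet" t || PySem.Str.isIn "demo" t || PySem.Str.isIn "presentasi" t ||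
      PySem.Str.isIn "ujian" t) = true <;>
    by_cases h2 : (PySem.Str.isIn "minggu ini" t ||
      (PySem.Str.isIn "bug" t || PySem.Str.isIn "error" t || PySem.Str.isIn "fix" t ||
       PySem.Str.isIn "hotfix" t || PySem.Str.isIn "laporan" t || PySem.Str.isIn "proposal" t ||
       PySem.Str.isIn "revisi" t || PySem.Str.isIn "project" t)) = true <;>
    simp_all <;> split_ifs <;> simp_all
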